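-- pv_equiv track=rewrite | github.com/sanshanya/hoshino_xcw | XCW/Hoshino/hoshino/modules/pcrsealkiller/_opencv_util.py | find_continuous_zeros
-- ===== SOURCE A (Python) =====
-- def find_continuous_zeros(nlist, required_amount):
--     i = 0
--     while i < len(nlist):
--         continuous_zeros_count = 0
--         for j in range(len(nlist)-i):
--             if nlist[i+j] == 0:
--                 continuous_zeros_count += 1
--             else:
--                 break
--             if continuous_zeros_count >= required_amount:
--                 return i
--         i += continuous_zeros_count + 1
--     return -1
-- ===== SOURCE B (Python) =====
-- def find_continuous_zeros(nlist, required_amount):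
--     count = 0
--     for idx in range(len(nlist)):
--         if nlist[idx] == 0:
--             count += 1
--             if count >= required_amount:
--                 return idx - count + 1
--         else:
--             count = 0
--     return -1
-- ===== Notes on version B (the rewrite author's own statement) =====
-- stated objective: simpler
-- what changed: Replaces A's nested outer-while plus inner scan-and-skip decomposition with a single flat pass that keeps a running consecutive-zero counter reset on each nonzero and returns idx - count + 1 when the counter reaches the threshold.
import Mathlib
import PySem

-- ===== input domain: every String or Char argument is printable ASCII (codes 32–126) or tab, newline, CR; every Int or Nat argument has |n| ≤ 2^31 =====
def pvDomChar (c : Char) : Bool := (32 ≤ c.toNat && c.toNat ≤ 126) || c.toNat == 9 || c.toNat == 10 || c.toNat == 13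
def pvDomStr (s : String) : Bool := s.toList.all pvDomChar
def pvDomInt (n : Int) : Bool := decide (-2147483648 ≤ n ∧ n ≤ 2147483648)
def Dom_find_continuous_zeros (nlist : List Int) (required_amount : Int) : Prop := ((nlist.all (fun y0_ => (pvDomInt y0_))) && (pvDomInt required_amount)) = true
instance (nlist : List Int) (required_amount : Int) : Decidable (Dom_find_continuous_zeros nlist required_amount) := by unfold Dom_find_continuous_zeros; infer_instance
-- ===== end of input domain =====

-- B replaces A's nested outer-while / inner scan-and-skip with one flat pass and a reset counter (objective: simpler).

-- ===== PORT A =====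
-- inner 'for j in range(len(nlist)-i)' loop of A, scanning the suffix nlist.drop i:
-- returns (returned?, continuous_zeros_count); returned? = true means 'return i' fired.
def fczInner (ra : Int) : List Int → Int → Bool × Int
  | [], count => (false, count)
  | x :: xs, count =>
    if x = 0 then
      let c := count + 1
      if ra ≤ c then (true, c) else fczInner ra xs c
    else (false, count)

-- outer 'while i < len(nlist)' loop of A
def fczOuter (nlist : List Int) (ra : Int) (i : Nat) : Int :=
  if h : i < nlist.length then
    let p := fczInner ra (nlist.drop i) 0
    if p.1 then (i : Int)
    else fczOuter nlist ra (i + p.2.toNat + 1)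
  else -1
termination_by nlist.length - i
decreasing_by omega

def find_continuous_zeros (nlist : List Int) (required_amount : Int) : Int :=
  fczOuter nlist required_amount 0

-- ===== PORT B =====
-- single flat pass: running consecutive-zero counter, reset on nonzero
def fczFlat (ra : Int) : List Int → Int → Int → Int
  | [], _, _ => -1
  | x :: xs, idx, count =>
    if x = 0 then
      let c := count + 1
      if ra ≤ c then idx - c + 1 else fczFlat ra xs (idx + 1) c
    else fczFlat ra xs (idx + 1) 0

def find_continuous_zeros_alt (nlist : List Int) (required_amount : Int) : Int :=
  fczFlat required_amount nlist 0 0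

-- ===== PRECONDITION & SPEC =====
def Spec_find_continuous_zeros (nlist : List Int) (required_amount : Int) (out : Int) : Prop := out = find_continuous_zeros_alt nlist required_amount
instance (nlist : List Int) (required_amount : Int) (out : Int) : Decidable (Spec_find_continuous_zeros nlist required_amount out) := by unfold Spec_find_continuous_zeros; infer_instance

-- ===== CLAIM (what is proved, stated in full; the proofs are below) =====
def Claim_equal_find_continuous_zeros : Prop := ∀ (nlist : List Int) (required_amount : Int), Dom_find_continuous_zeros nlist required_amount → Spec_find_continuous_zeros nlist required_amount (find_continuous_zeros nlist required_amount)

-- ===== LEMMAS AND PROOFS =====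

-- the 'count ≥ count0' invariant of the inner scan
theorem fczInner_ge (ra : Int) (l : List Int) (c0 : Int) : c0 ≤ (fczInner ra l c0).2 := by
  induction l generalizing c0 with
  | nil => simp [fczInner]
  | cons x xs ih =>
    simp only [fczInner]
    split_ifs with h1 h2
    · simp
    · exact le_trans (by omega) (ih (c0 + 1))
    · simp

-- if A's inner scan fires 'return i', B's flat loop over the same suffix returns idx - count0
theorem fczFlat_of_inner_true (ra : Int) (l : List Int) (c0 idx : Int)
    (h : (fczInner ra l c0).1 = true) : fczFlat ra l idx c0 = idx - c0 := by
  induction l generalizing c0 idx with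
  | nil => simp [fczInner] at h
  | cons x xs ih =>
    simp only [fczInner] at h
    simp only [fczFlat]
    split_ifs at h ⊢ with h1 h2
    · omega
    · have := ih (c0 + 1) (idx + 1) h
      omega

-- if A's inner scan breaks/exhausts with count c, B's flat loop over the same suffix
-- resumes (count reset to 0) just past the scanned block
theorem fczFlat_of_inner_false (ra : Int) (l : List Int) (c0 idx : Int)
    (h : (fczInner ra l c0).1 = false) :
    fczFlat ra l idx c0 =
      fczFlat ra (l.drop (((fczInner ra l c0).2 - c0).toNat + 1))
        (idx + ((fczInner ra l c0).2 - c0) + 1) 0 := by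
  induction l generalizing c0 idx with
  | nil => simp [fczInner, fczFlat]
  | cons x xs ih =>
    simp only [fczInner] at h ⊢
    simp only [fczFlat]
    split_ifs with h1 h2
    · simp [h1, h2] at h
    · have hge := fczInner_ge ra xs (c0 + 1)
      have heq := ih (c0 + 1) (idx + 1) (by simpa [fczInner, h1, h2] using h)
      have hdrop : ((fczInner ra xs (c0 + 1)).2 - c0).toNat + 1
          = (((fczInner ra xs (c0 + 1)).2 - (c0 + 1)).toNat + 1) + 1 := by omega
      rw [heq, hdrop]
      simp only [List.drop_succ_cons]
      congr 1
      omega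
    · simp only [sub_self, Int.toNat_zero, zero_add, List.drop_one, List.tail_cons, add_zero]

-- main simulation: A's outer loop at index i equals B's flat loop on the suffix
theorem fczOuter_eq_flat (nlist : List Int) (ra : Int) (i : Nat) :
    fczOuter nlist ra i = fczFlat ra (nlist.drop i) (i : Int) 0 := by
  fun_induction fczOuter nlist ra i with
  | case1 i h p hp =>
    rw [fczFlat_of_inner_true ra (nlist.drop i) 0 (i : Int) hp]
    omega
  | case2 i h p =>
    rename_i hp ih
    have hp' : (fczInner ra (nlist.drop i) 0).1 = false := by simpa using hp
    have hge := fczInner_ge ra (nlist.drop i) 0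
    rw [ih, fczFlat_of_inner_false ra (nlist.drop i) 0 (i : Int) hp']
    have hdrop : List.drop (i + (fczInner ra (nlist.drop i) 0).2.toNat + 1) nlist
        = List.drop (((fczInner ra (nlist.drop i) 0).2 - 0).toNat + 1) (List.drop i nlist) := by
      rw [List.drop_drop]; congr 1; omega
    have hcast : ((i + (fczInner ra (nlist.drop i) 0).2.toNat + 1 : Nat) : Int)
        = (i : Int) + ((fczInner ra (nlist.drop i) 0).2 - 0) + 1 := by omega
    rw [hdrop, hcast]
  | case3 i h =>
    rw [List.drop_eq_nil_of_le (by omega)]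
    simp [fczFlat]

-- ===== VERDICT (by name: the statement is the Claim_ definition above) =====
theorem find_continuous_zeros_spec : Claim_equal_find_continuous_zeros := by
  intro nlist ra _
  unfold Spec_find_continuous_zeros find_continuous_zeros find_continuous_zeros_alt
  simpa using fczOuter_eq_flat nlist ra 0
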